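-- pv_equiv track=rewrite | github.com/RoPeak/mediaflow | mediaflow/progress.py | preparation_timeline_text
-- ===== SOURCE A (Python) =====
-- PREPARATION_STAGE_SPECS: tuple[tuple[str, str, float, float], ...] = (
--     ("discovering", "Discovering files", 0.00, 0.10),
--     ("analysing", "Analysing files", 0.10, 0.55),
--     ("benchmarking", "Benchmarking profiles", 0.55, 0.75),
--     ("smoke", "Smoke probing", 0.75, 0.92),
--     ("scoring", "Scoring recommendations", 0.92, 0.99),
--     ("plan-ready", "Plan ready", 0.99, 1.00),
-- )
--
-- def normalize_preparation_stage(stage: str) -> str: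
--     lowered = stage.lower()
--     if "discover" in lowered:
--         return "discovering"
--     if "analys" in lowered:
--         return "analysing"
--     if "benchmark" in lowered or "provisional profile" in lowered:
--         return "benchmarking"
--     if "smoke" in lowered:
--         return "smoke"
--     if "scoring" in lowered:
--         return "scoring"
--     if "ready" in lowered:
--         return "plan-ready"
--     return "analysing"
--
-- def preparation_timeline_text(active_stage: str) -> str:
--     current_key = normalize_preparation_stage(active_stage)
--     stages = [(key, title) for key, title, _start, _end in PREPARATION_STAGE_SPECS]
--     current_index = next((index for index, (key, _title) in enumerate(stages) if key == current_key), 0)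
--     parts: list[str] = []
--     for index, (_key, title) in enumerate(stages):
--         if index < current_index:
--             prefix = "✓"
--         elif index == current_index:
--             prefix = "▶"
--         else:
--             prefix = "○"
--         parts.append(f"{prefix} {title}")
--     return "  •  ".join(parts)
-- ===== SOURCE B (Python) =====
-- PREPARATION_STAGE_SPECS: tuple[tuple[str, str, float, float], ...] = (
--     ("discovering", "Discovering files", 0.00, 0.10),
--     ("analysing", "Analysing files", 0.10, 0.55),
--     ("benchmarking", "Benchmarking profiles", 0.55, 0.75),
--     ("smoke", "Smoke probing", 0.75, 0.92),
--     ("scoring", "Scoring recommendations", 0.92, 0.99),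
--     ("plan-ready", "Plan ready", 0.99, 1.00),
-- )
--
-- def normalize_preparation_stage(stage: str) -> str:
--     lowered = stage.lower()
--     if "discover" in lowered:
--         return "discovering"
--     if "analys" in lowered:
--         return "analysing"
--     if "benchmark" in lowered or "provisional profile" in lowered:
--         return "benchmarking"
--     if "smoke" in lowered:
--         return "smoke"
--     if "scoring" in lowered:
--         return "scoring"
--     if "ready" in lowered:
--         return "plan-ready"
--     return "analysing"
--
-- def preparation_timeline_text(active_stage: str) -> str:
--     current_key = normalize_preparation_stage(active_stage)
--     parts: list[str] = []
--     passed = False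
--     for key, title, _start, _end in PREPARATION_STAGE_SPECS:
--         if key == current_key:
--             parts.append("▶ " + title)
--             passed = True
--         elif not passed:
--             parts.append("✓ " + title)
--         else:
--             parts.append("○ " + title)
--     return "  •  ".join(parts)
-- ===== Notes on version B (the rewrite author's own statement) =====
-- stated objective: simpler
-- what changed: B builds the timeline in a single pass carrying a boolean already-seen-current flag, eliminating A's separate next() index scan and the index comparisons in the build loop.
import Mathlib
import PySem

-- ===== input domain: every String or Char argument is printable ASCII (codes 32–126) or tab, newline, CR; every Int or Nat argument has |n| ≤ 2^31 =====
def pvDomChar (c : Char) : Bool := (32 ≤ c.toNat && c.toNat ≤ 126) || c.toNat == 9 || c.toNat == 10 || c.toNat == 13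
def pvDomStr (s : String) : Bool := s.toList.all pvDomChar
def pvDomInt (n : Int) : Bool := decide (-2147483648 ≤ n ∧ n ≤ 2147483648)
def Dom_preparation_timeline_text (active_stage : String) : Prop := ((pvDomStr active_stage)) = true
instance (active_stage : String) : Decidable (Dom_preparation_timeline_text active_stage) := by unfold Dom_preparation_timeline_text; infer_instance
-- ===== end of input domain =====

-- B rebuilds the timeline in one pass carrying a boolean flag instead of A's
-- separate index scan plus indexed comparison loop (objective: simpler).

-- The float bounds of PREPARATION_STAGE_SPECS are never read by this function,
-- so the constant is ported as the (key, title) pairs only.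
def pvPreparationStageSpecs : List (String × String) :=
  [("discovering", "Discovering files"),
   ("analysing", "Analysing files"),
   ("benchmarking", "Benchmarking profiles"),
   ("smoke", "Smoke probing"),
   ("scoring", "Scoring recommendations"),
   ("plan-ready", "Plan ready")]

-- normalize_preparation_stage, identical in A and B (B keeps it unchanged)
def pvNormalizeLowered (lowered : String) : String :=
  if PySem.Str.isIn "discover" lowered then "discovering"
  else if PySem.Str.isIn "analys" lowered then "analysing"
  else if PySem.Str.isIn "benchmark" lowered || PySem.Str.isIn "provisional profile" lowered then "benchmarking"
  else if PySem.Str.isIn "smoke" lowered then "smoke"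
  else if PySem.Str.isIn "scoring" lowered then "scoring"
  else if PySem.Str.isIn "ready" lowered then "plan-ready"
  else "analysing"

def pvNormalize (stage : String) : String :=
  pvNormalizeLowered (PySem.Str.lower stage)

-- ===== PORT A =====
-- body of A after current_key is computed: next(...) index scan, then indexed loop
def pvTimelineFromKey (current_key : String) : String :=
  let stages := pvPreparationStageSpecs
  let current_index : Int :=
    (((PySem.List.enumerate stages).find? (fun p => p.2.1 == current_key)).map (·.1)).getD 0
  let parts : List String :=
    (PySem.List.enumerate stages).foldl
      (fun (parts : List String) p =>
        let prefx : String :=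
          if p.1 < current_index then "✓"
          else if p.1 == current_index then "▶"
          else "○"
        parts ++ [prefx ++ " " ++ p.2.2]) []
  PySem.Str.join "  •  " parts

def preparation_timeline_text (active_stage : String) : String :=
  pvTimelineFromKey (pvNormalize active_stage)

-- ===== PORT B =====
-- body of B after current_key: single pass carrying (parts, passed)
def pvTimelineFromKeyAlt (current_key : String) : String :=
  let st :=
    pvPreparationStageSpecs.foldl
      (fun (st : List String × Bool) kv =>
        if kv.1 == current_key then (st.1 ++ ["▶ " ++ kv.2], true)
        else if !st.2 then (st.1 ++ ["✓ " ++ kv.2], st.2)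
        else (st.1 ++ ["○ " ++ kv.2], st.2)) ([], false)
  PySem.Str.join "  •  " st.1

def preparation_timeline_text_alt (active_stage : String) : String :=
  pvTimelineFromKeyAlt (pvNormalize active_stage)

-- ===== PRECONDITION & SPEC =====
def Spec_preparation_timeline_text (active_stage : String) (out : String) : Prop := out = preparation_timeline_text_alt active_stage
instance (active_stage : String) (out : String) : Decidable (Spec_preparation_timeline_text active_stage out) := by unfold Spec_preparation_timeline_text; infer_instance

-- ===== CLAIM (what is proved, stated in full; the proofs are below) =====
def Claim_equal_preparation_timeline_text : Prop := ∀ (active_stage : String), Dom_preparation_timeline_text active_stage → Spec_preparation_timeline_text active_stage (preparation_timeline_text active_stage)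

-- ===== LEMMAS AND PROOFS =====

-- normalize always returns one of the six stage keys
theorem pvNormalize_mem (stage : String) :
    pvNormalize stage ∈ ["discovering", "analysing", "benchmarking", "smoke", "scoring", "plan-ready"] := by
  unfold pvNormalize pvNormalizeLowered
  split_ifs <;> simp

set_option maxRecDepth 8192 in
-- the two builders agree on every key normalize can produce
theorem pvTimeline_eq_on_keys (k : String)
    (hk : k ∈ ["discovering", "analysing", "benchmarking", "smoke", "scoring", "plan-ready"]) :
    pvTimelineFromKey k = pvTimelineFromKeyAlt k := by
  simp only [List.mem_cons, List.not_mem_nil, or_false] at hk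
  rcases hk with h | h | h | h | h | h <;> subst h <;> decide

-- ===== VERDICT (by name: the statement is the Claim_ definition above) =====
theorem preparation_timeline_text_spec : Claim_equal_preparation_timeline_text := by
  intro s _
  unfold Spec_preparation_timeline_text preparation_timeline_text preparation_timeline_text_alt
  exact pvTimeline_eq_on_keys _ (pvNormalize_mem s)
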